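-- pv_equiv track=rewrite | github.com/jakainic/Disparate_Impact | repair_help.py | get_group_data
-- ===== SOURCE A (Python) =====
-- def get_group_data(repair_col, protected_col, gps):
-- 	num_rows = len(repair_col)
-- 	gp_data = {gp: [] for gp in gps}
--
--
-- 	for row in range(num_rows):
-- 		gp = protected_col[row]
-- 		gp_data[gp].append((repair_col[row],row))
--
-- 	for gp in gps:
-- 		gp_data[gp].sort(key = lambda entry: entry[0])
--
-- 	return gp_data
-- ===== SOURCE B (Python) =====
-- def get_group_data(repair_col, protected_col, gps):
-- 	gp_data = {gp: [] for gp in gps}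
-- 	items = sorted([(repair_col[row], row) for row in range(len(repair_col))],
-- 	               key=lambda e: e[0])
-- 	for value, row in items:
-- 		gp_data[protected_col[row]].append((value, row))
-- 	return gp_data
-- ===== Notes on version B (the rewrite author's own statement) =====
-- stated objective: faster
-- what changed: B performs one global stable sort of all (value,row) pairs and distributes them into the pre-initialized group buckets in one pass, instead of A's bucket-first pass followed by one .sort() call per entry of gps (repeated entries in gps make A re-sort the same bucket); stability makes each bucket come out identically sorted.
import Mathlib
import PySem

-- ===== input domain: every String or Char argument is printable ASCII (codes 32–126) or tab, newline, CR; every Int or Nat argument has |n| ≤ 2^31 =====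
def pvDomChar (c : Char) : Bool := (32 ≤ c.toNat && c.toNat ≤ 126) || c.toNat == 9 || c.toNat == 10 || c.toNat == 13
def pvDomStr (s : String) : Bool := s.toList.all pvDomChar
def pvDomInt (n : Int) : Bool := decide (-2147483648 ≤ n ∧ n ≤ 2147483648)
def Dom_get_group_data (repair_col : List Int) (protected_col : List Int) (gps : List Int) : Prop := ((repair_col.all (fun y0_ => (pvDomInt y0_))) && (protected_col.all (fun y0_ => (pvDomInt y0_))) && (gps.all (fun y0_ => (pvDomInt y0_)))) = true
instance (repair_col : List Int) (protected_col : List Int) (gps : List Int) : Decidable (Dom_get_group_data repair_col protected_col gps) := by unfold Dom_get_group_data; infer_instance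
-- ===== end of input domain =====

-- B replaces A's bucket-then-sort-each-group pass by one global stable sort of all
-- (value,row) pairs followed by a single distribution pass into the buckets (objective: alternative).

-- ===== PORT A =====
def get_group_data (repair_col : List Int) (protected_col : List Int) (gps : List Int) : List (Int × List (Int × Int)) :=
  let num_rows : Int := repair_col.length
  let gp_data : PySem.Dict Int (List (Int × Int)) :=
    gps.foldl (fun d gp => d.insert gp []) PySem.Dict.empty
  let gp_data :=
    (PySem.List.pyRange 0 num_rows 1).foldl
      (fun d row =>
        let gp := PySem.List.pyGetD protected_col row 0
        d.modify gp [] (fun l => l ++ [(PySem.List.pyGetD repair_col row 0, row)])) gp_data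
  let gp_data :=
    gps.foldl (fun d gp => d.modify gp [] (fun l => PySem.List.sorted l (fun e => e.1))) gp_data
  gp_data.items

-- ===== PORT B =====
def get_group_data_alt (repair_col : List Int) (protected_col : List Int) (gps : List Int) : List (Int × List (Int × Int)) :=
  let gp_data : PySem.Dict Int (List (Int × Int)) :=
    gps.foldl (fun d gp => d.insert gp []) PySem.Dict.empty
  let items :=
    PySem.List.sorted
      ((PySem.List.pyRange 0 (repair_col.length : Int) 1).map
        (fun row => (PySem.List.pyGetD repair_col row 0, row)))
      (fun e => e.1)
  let gp_data :=
    items.foldl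
      (fun d e => d.modify (PySem.List.pyGetD protected_col e.2 0) [] (fun l => l ++ [e]))
      gp_data
  gp_data.items

-- ===== PRECONDITION & SPEC =====
-- Pre_ excludes exactly the inputs where Python A raises: an IndexError when protected_col is
-- shorter than repair_col, or a KeyError when a used protected value is not among gps.
def Pre_get_group_data (repair_col : List Int) (protected_col : List Int) (gps : List Int) : Prop :=
  repair_col.length ≤ protected_col.length ∧
  ∀ x ∈ protected_col.take repair_col.length, x ∈ gps
instance (repair_col : List Int) (protected_col : List Int) (gps : List Int) : Decidable (Pre_get_group_data repair_col protected_col gps) := by unfold Pre_get_group_data; infer_instance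

def pvWitness_get_group_data : List Int × List Int × List Int := ([3, 1, 3], [5, 6, 5], [5, 6])

def Spec_get_group_data (repair_col : List Int) (protected_col : List Int) (gps : List Int) (out : List (Int × List (Int × Int))) : Prop := out = get_group_data_alt repair_col protected_col gps
instance (repair_col : List Int) (protected_col : List Int) (gps : List Int) (out : List (Int × List (Int × Int))) : Decidable (Spec_get_group_data repair_col protected_col gps out) := by unfold Spec_get_group_data; infer_instance

-- ===== CLAIM (what is proved, stated in full; the proofs are below) =====
def Claim_equal_get_group_data : Prop := ∀ (repair_col : List Int) (protected_col : List Int) (gps : List Int), Dom_get_group_data repair_col protected_col gps → Pre_get_group_data repair_col protected_col gps → Spec_get_group_data repair_col protected_col gps (get_group_data repair_col protected_col gps)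

-- ===== LEMMAS AND PROOFS =====

-- insertBy with the '<' test keeps a key-nondecreasing list key-nondecreasing
theorem pv_pairwise_insertBy {α : Type} (key : α → Int) (x : α) (ys : List α)
    (h : ys.Pairwise (fun a b => key a ≤ key b)) :
    (PySem.List.insertBy (fun a b => decide (key a < key b)) x ys).Pairwise
      (fun a b => key a ≤ key b) := by
  induction ys with
  | nil => simp [PySem.List.insertBy]
  | cons y ys ih =>
    rcases List.pairwise_cons.mp h with ⟨hy, h'⟩
    by_cases hlt : key x < key y
    · have hred : PySem.List.insertBy (fun a b => decide (key a < key b)) x (y :: ys) = x :: y :: ys := by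
        simp [PySem.List.insertBy, hlt]
      rw [hred]
      refine List.pairwise_cons.mpr ⟨?_, h⟩
      intro z hz
      rcases List.mem_cons.mp hz with hz | hz
      · exact hz ▸ le_of_lt hlt
      · exact le_trans (le_of_lt hlt) (hy z hz)
    · have hred : PySem.List.insertBy (fun a b => decide (key a < key b)) x (y :: ys) = y :: PySem.List.insertBy (fun a b => decide (key a < key b)) x ys := by
        simp [PySem.List.insertBy, hlt]
      rw [hred]
      refine List.pairwise_cons.mpr ⟨?_, ih h'⟩
      intro z hz
      rcases (PySem.List.mem_insertBy _ _ _ _).mp hz with hz | hz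
      · exact hz ▸ not_lt.mp hlt
      · exact hy z hz

-- when x's key is strictly below everything, insertBy puts it in front
theorem pv_insertBy_front {α : Type} (key : α → Int) (x : α) (zs : List α)
    (h : ∀ z ∈ zs, key x < key z) :
    PySem.List.insertBy (fun a b => decide (key a < key b)) x zs = x :: zs := by
  cases zs with
  | nil => simp [PySem.List.insertBy]
  | cons z zs => simp [PySem.List.insertBy, h z (List.mem_cons_self ..)]

-- filter commutes with one insertBy step on a key-nondecreasing list
theorem pv_filter_insertBy {α : Type} (p : α → Bool) (key : α → Int) (x : α) (ys : List α)
    (h : ys.Pairwise (fun a b => key a ≤ key b)) :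
    (PySem.List.insertBy (fun a b => decide (key a < key b)) x ys).filter p
      = if p x then PySem.List.insertBy (fun a b => decide (key a < key b)) x (ys.filter p)
        else ys.filter p := by
  induction ys with
  | nil => cases hp : p x <;> simp [PySem.List.insertBy, hp]
  | cons y ys ih =>
    rcases List.pairwise_cons.mp h with ⟨hy, h'⟩
    by_cases hlt : key x < key y
    · have hfront : ∀ z ∈ (y :: ys).filter p, key x < key z := by
        intro z hz
        rcases List.mem_cons.mp (List.mem_of_mem_filter hz) with hz' | hz'
        · exact hz' ▸ hlt
        · exact lt_of_lt_of_le hlt (hy z hz')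
      rw [pv_insertBy_front key x _ hfront]
      have hred : PySem.List.insertBy (fun a b => decide (key a < key b)) x (y :: ys) = x :: y :: ys := by
        simp [PySem.List.insertBy, hlt]
      rw [hred]
      cases hp : p x <;> simp [List.filter, hp]
    · have hred : PySem.List.insertBy (fun a b => decide (key a < key b)) x (y :: ys) = y :: PySem.List.insertBy (fun a b => decide (key a < key b)) x ys := by
        simp [PySem.List.insertBy, hlt]
      rw [hred]
      cases hpy : p y
      · simp only [List.filter, hpy, ih h']
      · simp only [List.filter, hpy]
        by_cases hpx : p x
        · rw [if_pos hpx] at ih ⊢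
          have hred2 : PySem.List.insertBy (fun a b => decide (key a < key b)) x (y :: List.filter p ys) = y :: PySem.List.insertBy (fun a b => decide (key a < key b)) x (List.filter p ys) := by
            simp [PySem.List.insertBy, hlt]
          rw [hred2, ih h']
        · rw [if_neg hpx] at ih ⊢
          rw [ih h']

-- filter commutes with Python's stable sort
theorem pv_filter_sorted {α : Type} (p : α → Bool) (key : α → Int) (xs : List α) :
    (PySem.List.sorted xs key).filter p = PySem.List.sorted (xs.filter p) key := by
  rw [PySem.List.sorted_eq_foldl_insertBy, PySem.List.sorted_eq_foldl_insertBy]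
  suffices h : ∀ (acc : List α), acc.Pairwise (fun a b => key a ≤ key b) →
      (xs.foldl (fun acc x => PySem.List.insertBy (fun a b => decide (key a < key b)) x acc) acc).filter p
        = (xs.filter p).foldl (fun acc x => PySem.List.insertBy (fun a b => decide (key a < key b)) x acc) (acc.filter p) by
    simpa using h [] (List.Pairwise.nil)
  induction xs with
  | nil => intro acc _; simp
  | cons x xs ih =>
    intro acc hacc
    simp only [List.foldl_cons, List.filter]
    cases hp : p x
    · rw [ih _ (pv_pairwise_insertBy key x acc hacc),
        pv_filter_insertBy p key x acc hacc, hp]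
      simp
    · rw [ih _ (pv_pairwise_insertBy key x acc hacc),
        pv_filter_insertBy p key x acc hacc, hp]
      simp

-- the initial dict {gp: [] for gp in gps} maps every key to []
theorem pv_getD_init (gps : List Int) (d : PySem.Dict Int (List (Int × Int)))
    (hd : ∀ c, d.getD c [] = []) (c : Int) :
    (gps.foldl (fun d gp => d.insert gp []) d).getD c [] = [] := by
  induction gps generalizing d with
  | nil => exact hd c
  | cons g gs ih =>
    simp only [List.foldl_cons]
    refine ih _ ?_
    intro c'
    rw [PySem.Dict.getD_insert]
    split <;> simp [hd]

-- per-key effect of the "sort every group" loop, for an idempotent f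
theorem pv_getD_modify_loop {β : Type} (f : List β → List β) (hf : ∀ l, f (f l) = f l)
    (ks : List Int) (d : PySem.Dict Int (List β)) (c : Int) :
    (ks.foldl (fun d k => d.modify k [] f) d).getD c []
      = if c ∈ ks then f (d.getD c []) else d.getD c [] := by
  induction ks generalizing d with
  | nil => simp
  | cons k ks ih =>
    simp only [List.foldl_cons, ih, PySem.Dict.getD_modify, List.mem_cons]
    by_cases hck : c = k
    · subst hck
      by_cases hmem : c ∈ ks <;> simp [hmem, hf]
    · by_cases hmem : c ∈ ks <;> simp [hmem, hck]

-- Set.update by elements already present is the identity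
theorem pv_set_update_of_subset (s : PySem.Set Int) (xs : List Int)
    (h : ∀ x ∈ xs, x ∈ s) : PySem.Set.update s xs = s := by
  rw [PySem.Set.update_eq_append_filter]
  have hnil : List.filter (fun y => !s.contains y) (PySem.Set.ofList xs) = [] := by
    simp only [List.filter_eq_nil_iff]
    intro y hy
    have hys := h y ((PySem.Set.mem_ofList _ _).mp hy)
    simp [hys]
  rw [hnil, List.append_nil]

-- the whole equivalence, with the row-indexed lookups abstracted as functions
theorem pv_main_aux (prowf : Int → Int) (vrowf : Int → Int × Int) (rows : List Int)
    (gps : List Int) (hv : ∀ r, (vrowf r).2 = r) (hmem : ∀ r ∈ rows, prowf r ∈ gps) :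
    (gps.foldl (fun d gp => d.modify gp [] (fun l => PySem.List.sorted l (fun e => e.1)))
      (rows.foldl (fun d row => d.modify (prowf row) [] (fun l => l ++ [vrowf row]))
        (gps.foldl (fun d gp => d.insert gp ([] : List (Int × Int))) PySem.Dict.empty))).items
    = ((PySem.List.sorted (rows.map vrowf) (fun e => e.1)).foldl
        (fun d e => d.modify (prowf e.2) [] (fun l => l ++ [e]))
        (gps.foldl (fun d gp => d.insert gp []) PySem.Dict.empty)).items := by
  have hK0 : (gps.foldl (fun d gp => d.insert gp ([] : List (Int × Int))) PySem.Dict.empty).keys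
      = PySem.Set.ofList gps := by
    rw [PySem.Dict.keys_foldl_insert gps (fun _ _ => []) PySem.Dict.empty]
    simp [PySem.Set.update_nil_left]
  have hgd0 : ∀ c, (gps.foldl (fun d gp => d.insert gp ([] : List (Int × Int))) PySem.Dict.empty).getD c [] = [] :=
    fun c => pv_getD_init gps _ (fun c' => PySem.Dict.getD_empty c' []) c
  -- per-key contents of A's dict after the append loop
  have hA1 : ∀ c, ((rows.foldl (fun d row => d.modify (prowf row) [] (fun l => l ++ [vrowf row]))
        (gps.foldl (fun d gp => d.insert gp ([] : List (Int × Int))) PySem.Dict.empty))).getD c []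
      = (rows.filter (fun row => prowf row == c)).map vrowf := by
    intro c
    have hfold : (rows.foldl (fun d row => d.modify (prowf row) [] (fun l => l ++ [vrowf row]))
          (gps.foldl (fun d gp => d.insert gp ([] : List (Int × Int))) PySem.Dict.empty))
        = ((rows.map (fun row => (prowf row, vrowf row))).foldl
            (fun d p => d.modify p.1 [] (fun l => l ++ [p.2]))
            (gps.foldl (fun d gp => d.insert gp ([] : List (Int × Int))) PySem.Dict.empty)) := by
      rw [List.foldl_map]
    rw [hfold, PySem.Dict.getD_foldl_modify_append, hgd0, List.nil_append, List.filter_map,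
      List.map_map]
    rfl
  have hKA1 : ((rows.foldl (fun d row => d.modify (prowf row) [] (fun l => l ++ [vrowf row]))
        (gps.foldl (fun d gp => d.insert gp ([] : List (Int × Int))) PySem.Dict.empty))).keys
      = PySem.Set.ofList gps := by
    rw [PySem.Dict.keys_foldl_modify_key rows (fun row => prowf row) []
      (fun _ row l => l ++ [vrowf row]) _, hK0]
    refine pv_set_update_of_subset _ _ ?_
    intro x hx
    rcases List.mem_map.mp hx with ⟨r, hr, hxr⟩
    exact (PySem.Set.mem_ofList _ _).mpr (hxr ▸ hmem r hr)
  -- per-key contents of A's dict after the sort loop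
  have hA2 : ∀ c ∈ gps, ((gps.foldl (fun d gp => d.modify gp [] (fun l => PySem.List.sorted l (fun e => e.1)))
        (rows.foldl (fun d row => d.modify (prowf row) [] (fun l => l ++ [vrowf row]))
          (gps.foldl (fun d gp => d.insert gp ([] : List (Int × Int))) PySem.Dict.empty)))).getD c []
      = PySem.List.sorted ((rows.filter (fun row => prowf row == c)).map vrowf) (fun e => e.1) := by
    intro c hc
    rw [pv_getD_modify_loop (fun l : List (Int × Int) => PySem.List.sorted l (fun e => e.1))
      (fun l => PySem.List.sorted_sorted l (fun e : Int × Int => e.1)) gps _ c, if_pos hc, hA1]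
  have hKA2 : ((gps.foldl (fun d gp => d.modify gp [] (fun l => PySem.List.sorted l (fun e => e.1)))
        (rows.foldl (fun d row => d.modify (prowf row) [] (fun l => l ++ [vrowf row]))
          (gps.foldl (fun d gp => d.insert gp ([] : List (Int × Int))) PySem.Dict.empty)))).keys
      = PySem.Set.ofList gps := by
    rw [PySem.Dict.keys_foldl_modify gps []
      (fun _ _ (l : List (Int × Int)) => PySem.List.sorted l (fun e => e.1)) _, hKA1]
    refine pv_set_update_of_subset _ _ ?_
    intro x hx
    exact (PySem.Set.mem_ofList _ _).mpr hx
  -- per-key contents of B's dict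
  have hB : ∀ c, (((PySem.List.sorted (rows.map vrowf) (fun e => e.1)).foldl
        (fun d e => d.modify (prowf e.2) [] (fun l => l ++ [e]))
        (gps.foldl (fun d gp => d.insert gp ([] : List (Int × Int))) PySem.Dict.empty))).getD c []
      = (PySem.List.sorted (rows.map vrowf) (fun e => e.1)).filter (fun e => prowf e.2 == c) := by
    intro c
    have hfold : ((PySem.List.sorted (rows.map vrowf) (fun e => e.1)).foldl
          (fun d e => d.modify (prowf e.2) [] (fun l => l ++ [e]))
          (gps.foldl (fun d gp => d.insert gp ([] : List (Int × Int))) PySem.Dict.empty))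
        = (((PySem.List.sorted (rows.map vrowf) (fun e => e.1)).map (fun e => (prowf e.2, e))).foldl
            (fun d p => d.modify p.1 [] (fun l => l ++ [p.2]))
            (gps.foldl (fun d gp => d.insert gp ([] : List (Int × Int))) PySem.Dict.empty)) := by
      rw [List.foldl_map]
    rw [hfold, PySem.Dict.getD_foldl_modify_append, hgd0, List.nil_append, List.filter_map,
      List.map_map]
    simp [Function.comp_def]
  have hKB : (((PySem.List.sorted (rows.map vrowf) (fun e => e.1)).foldl
        (fun d e => d.modify (prowf e.2) [] (fun l => l ++ [e]))
        (gps.foldl (fun d gp => d.insert gp ([] : List (Int × Int))) PySem.Dict.empty))).keys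
      = PySem.Set.ofList gps := by
    rw [PySem.Dict.keys_foldl_modify_key _ (fun e : Int × Int => prowf e.2) []
      (fun _ (e : Int × Int) l => l ++ [e]) _, hK0]
    refine pv_set_update_of_subset _ _ ?_
    intro x hx
    rcases List.mem_map.mp hx with ⟨e, he, hxe⟩
    rcases List.mem_map.mp ((PySem.List.mem_sorted _ _ _ _).mp he) with ⟨r, hr, her⟩
    refine (PySem.Set.mem_ofList _ _).mpr ?_
    rw [← hxe, ← her, hv r]
    exact hmem r hr
  -- per-key agreement of the two final dicts
  have hval : ∀ c ∈ gps,
      ((gps.foldl (fun d gp => d.modify gp [] (fun l => PySem.List.sorted l (fun e => e.1)))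
        (rows.foldl (fun d row => d.modify (prowf row) [] (fun l => l ++ [vrowf row]))
          (gps.foldl (fun d gp => d.insert gp ([] : List (Int × Int))) PySem.Dict.empty)))).getD c []
      = (((PySem.List.sorted (rows.map vrowf) (fun e => e.1)).foldl
          (fun d e => d.modify (prowf e.2) [] (fun l => l ++ [e]))
          (gps.foldl (fun d gp => d.insert gp ([] : List (Int × Int))) PySem.Dict.empty))).getD c [] := by
    intro c hc
    rw [hA2 c hc, hB c, pv_filter_sorted, List.filter_map]
    have hpred : ((fun e => prowf e.2 == c) ∘ vrowf) = (fun row => prowf row == c) := by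
      funext r
      simp [Function.comp, hv r]
    rw [hpred]
  rw [PySem.Dict.items_eq_map_keys _ (hKA2 ▸ PySem.Set.nodup_ofList gps) [],
    PySem.Dict.items_eq_map_keys _ (hKB ▸ PySem.Set.nodup_ofList gps) [], hKA2, hKB]
  refine List.map_congr_left ?_
  intro k hk
  rw [hval k ((PySem.Set.mem_ofList _ _).mp hk)]

-- ===== VERDICT (by name: the statement is the Claim_ definition above) =====
theorem get_group_data_spec : Claim_equal_get_group_data := by
  intro rc pc gps _ hpre
  unfold Spec_get_group_data get_group_data get_group_data_alt
  have hmem : ∀ r ∈ PySem.List.pyRange 0 (rc.length : Int) 1,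
      PySem.List.pyGetD pc r 0 ∈ gps := by
    intro r hr
    obtain ⟨h0, hlt⟩ := PySem.List.mem_pyRange_one.mp hr
    have hk : ((r.toNat : Nat) : Int) = r := Int.toNat_of_nonneg h0
    have hkn : r.toNat < rc.length := by omega
    have hkp : r.toNat < pc.length := lt_of_lt_of_le hkn hpre.1
    have hget : PySem.List.pyGetD pc r 0 = pc[r.toNat] := by
      conv_lhs => rw [← hk]
      rw [PySem.List.pyGetD_natCast, List.getD_eq_getElem pc 0 hkp]
    have ht : r.toNat < (pc.take rc.length).length := by
      simp [List.length_take]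
      omega
    have htake : (pc.take rc.length)[r.toNat] = pc[r.toNat] := List.getElem_take
    rw [hget, ← htake]
    exact hpre.2 _ (List.getElem_mem ht)
  exact pv_main_aux (fun row => PySem.List.pyGetD pc row 0)
    (fun row => (PySem.List.pyGetD rc row 0, row))
    (PySem.List.pyRange 0 (rc.length : Int) 1) gps (fun r => rfl) hmem
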